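-- pv_equiv track=rewrite | github.com/bbonf/chili | chili/__init__.py | find_loose
-- ===== SOURCE A (Python) =====
-- def find_loose(haystack, needle):
--     """ an attempt at fuzzy lookup. should be rewritten """
--     position = 0
--     distance = 0
--     for char in needle:
--         next_position = haystack.find(char, position)
--         if next_position < 0:
--             return False
--
--         distance += next_position - position
--         position = next_position
--
--     return distance
-- ===== SOURCE B (Python) =====
-- def find_loose(haystack, needle):
--     """Precompute a char -> ascending positions index in one pass, then for
--     each needle char binary-search its next occurrence; the gap distances
--     telescope to the last matched position."""
--     index = {}
--     for i, ch in enumerate(haystack):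
--         if ch in index:
--             index[ch].append(i)
--         else:
--             index[ch] = [i]
--     pos = 0
--     for ch in needle:
--         if ch not in index:
--             return False
--         lst = index[ch]
--         lo, hi = 0, len(lst)
--         while lo < hi:
--             mid = (lo + hi) // 2
--             if lst[mid] < pos:
--                 lo = mid + 1
--             else:
--                 hi = mid
--         if lo == len(lst):
--             return False
--         pos = lst[lo]
--     return pos
-- ===== Notes on version B (the rewrite author's own statement) =====
-- stated objective: alternative
-- what changed: Replaced the per-needle-char haystack.find scan with a precomputed char->ascending-positions index built in one haystack pass plus a hand-written binary search for the next occurrence; the gap distances telescope to the last matched position.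
-- outside the precondition, e.g. on find_loose('abc', 'x'): A returns False, B returns False
import Mathlib
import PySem

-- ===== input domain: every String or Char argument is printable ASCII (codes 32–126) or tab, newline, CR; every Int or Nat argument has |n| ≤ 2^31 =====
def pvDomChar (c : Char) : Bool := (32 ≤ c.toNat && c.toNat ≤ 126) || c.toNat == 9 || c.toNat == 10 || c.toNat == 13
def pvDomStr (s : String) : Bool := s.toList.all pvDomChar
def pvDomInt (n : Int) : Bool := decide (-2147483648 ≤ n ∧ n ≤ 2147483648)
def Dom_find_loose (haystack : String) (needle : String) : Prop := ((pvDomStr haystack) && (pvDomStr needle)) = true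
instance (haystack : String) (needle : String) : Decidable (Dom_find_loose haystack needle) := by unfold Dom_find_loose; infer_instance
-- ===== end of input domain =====

-- B replaces A's repeated haystack.find(char, position) calls by a one-pass
-- char -> ascending-positions index plus a hand-written binary search for the
-- next occurrence per needle char (the gap distances telescope to it);
-- an alternative algorithm of similar cost, not claimed faster.


-- ===== PORT A =====
-- the for-loop over needle with state (position, distance); haystack.find(char, position)
-- is PySem.Chars.findFrom on the code points (exact per PySem.Str.findFrom_eq).
-- On the failure branch Python returns False (a bool, not an int): excluded by Pre_;
-- the port returns 0 there.
def find_loose_aLoop (hay : List Char) : List Char → Int → Int → Int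
  | [], _position, distance => distance
  | c :: rest, position, distance =>
    let next_position := PySem.Chars.findFrom hay [c] position none
    if next_position < 0 then 0
    else find_loose_aLoop hay rest next_position (distance + (next_position - position))

def find_loose (haystack : String) (needle : String) : Int :=
  find_loose_aLoop haystack.toList needle.toList 0 0

-- ===== PORT B =====
-- 'for i, ch in enumerate(haystack): if ch in index: index[ch].append(i) else: index[ch] = [i]'
def find_loose_step (d : PySem.Dict Char (List Int)) (p : Int × Char) : PySem.Dict Char (List Int) :=
  if d.contains p.2 then d.modify p.2 [] (fun l => l ++ [p.1]) else d.insert p.2 [p.1]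

def find_loose_buildIndex (hay : List Char) : PySem.Dict Char (List Int) :=
  (PySem.List.enumerate hay 0).foldl find_loose_step PySem.Dict.empty

-- the hand-written 'while lo < hi' binary search; lst[mid] is always in range
-- (lo ≤ mid < hi ≤ len), ported as getD with default 0; the fuel argument
-- (called with hi - lo, which bounds the iteration count) only makes the
-- same computation structurally total.
def find_loose_bisect (lst : List Int) (pos : Int) : Nat → Nat → Nat → Nat
  | 0, lo, _hi => lo
  | fuel + 1, lo, hi =>
    if lo < hi then
      let mid := (lo + hi) / 2
      if lst.getD mid 0 < pos then find_loose_bisect lst pos fuel (mid + 1) hi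
      else find_loose_bisect lst pos fuel lo mid
    else lo

-- the for-loop over needle with state pos; Python's 'return False' branches
-- (excluded by Pre_) are ported as 0.
def find_loose_bLoop (idx : PySem.Dict Char (List Int)) : List Char → Int → Int
  | [], pos => pos
  | ch :: rest, pos =>
    match idx.get? ch with
    | none => 0
    | some lst =>
      let lo := find_loose_bisect lst pos lst.length 0 lst.length
      if lo = lst.length then 0
      else find_loose_bLoop idx rest (lst.getD lo 0)

def find_loose_alt (haystack : String) (needle : String) : Int :=
  find_loose_bLoop (find_loose_buildIndex haystack.toList) needle.toList 0

-- ===== PRECONDITION & SPEC =====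
-- Pre_ excludes exactly the inputs on which A returns False (a bool, not a value of the
-- declared int type): those where the needle, with consecutive duplicate characters
-- collapsed, is not a subsequence of the haystack.  B also returns False there.
def Pre_find_loose (haystack : String) (needle : String) : Prop :=
  (List.destutter (· ≠ ·) needle.toList).Sublist haystack.toList
instance (haystack : String) (needle : String) : Decidable (Pre_find_loose haystack needle) := by unfold Pre_find_loose; infer_instance

def pvWitness_find_loose : String × String := ("abracadabra", "bad")

def Spec_find_loose (haystack : String) (needle : String) (out : Int) : Prop := out = find_loose_alt haystack needle
instance (haystack : String) (needle : String) (out : Int) : Decidable (Spec_find_loose haystack needle out) := by unfold Spec_find_loose; infer_instance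

-- ===== CLAIM (what is proved, stated in full; the proofs are below) =====
def Claim_equal_find_loose : Prop := ∀ (haystack : String) (needle : String), Dom_find_loose haystack needle → Pre_find_loose haystack needle → Spec_find_loose haystack needle (find_loose haystack needle)

-- ===== LEMMAS AND PROOFS =====

-- the positions (as Python ints) at which c occurs in hay, counting from s
def fl_occ (hay : List Char) (s : Int) (c : Char) : List Int :=
  (PySem.List.enumerate hay s).filterMap fun p => if p.2 = c then some p.1 else none

theorem fl_occ_cons (x : Char) (xs : List Char) (s : Int) (c : Char) :
    fl_occ (x :: xs) s c = (if x = c then [s] else []) ++ fl_occ xs (s + 1) c := by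
  simp only [fl_occ, PySem.List.enumerate_cons, List.filterMap_cons]
  split_ifs <;> simp

theorem fl_occ_mem (hay : List Char) : ∀ (s : Int) (c : Char) (i : Int),
    i ∈ fl_occ hay s c ↔ ∃ j : Nat, j < hay.length ∧ hay[j]? = some c ∧ i = s + j := by
  induction hay with
  | nil => intro s c i; simp [fl_occ]
  | cons x xs ih =>
    intro s c i
    rw [fl_occ_cons]
    simp only [List.mem_append]
    constructor
    · rintro (h | h)
      · by_cases hx : x = c
        · rw [if_pos hx] at h; simp at h
          exact ⟨0, by simp, by simp [hx], by simpa using h⟩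
        · rw [if_neg hx] at h; simp at h
      · obtain ⟨j, hj1, hj2, hj3⟩ := (ih (s + 1) c i).1 h
        exact ⟨j + 1, by simpa using hj1, by simpa using hj2, by push_cast [hj3]; ring⟩
    · rintro ⟨j, hj1, hj2, hj3⟩
      cases j with
      | zero =>
        left
        have hx : x = c := by simpa using hj2
        simp [hx, hj3]
      | succ j =>
        right
        refine (ih (s + 1) c i).2 ⟨j, by simpa using hj1, by simpa using hj2, ?_⟩
        push_cast [hj3]; ring

theorem fl_occ_sorted (hay : List Char) : ∀ (s : Int) (c : Char),
    (fl_occ hay s c).Pairwise (· < ·) := by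
  induction hay with
  | nil => intro s c; simp [fl_occ]
  | cons x xs ih =>
    intro s c
    rw [fl_occ_cons, List.pairwise_append]
    refine ⟨by split_ifs <;> simp, ih (s + 1) c, ?_⟩
    intro a ha b hb
    have haeq : a = s := by
      split_ifs at ha with h
      · simpa using ha
      · simp at ha
    obtain ⟨j, _, _, hb3⟩ := (fl_occ_mem xs (s + 1) c b).1 hb
    omega

-- d.get? k through contains/getD (so insert/modify lemmas apply uniformly)
theorem fl_get?_eq_if {κ ν : Type} [BEq κ] [LawfulBEq κ] (d : PySem.Dict κ ν) (k : κ) (dflt : ν) :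
    d.get? k = if d.contains k then some (d.getD k dflt) else none := by
  by_cases h : d.contains k
  · rw [if_pos h]
    cases hg : d.get? k with
    | none => exact absurd ((PySem.Dict.get?_eq_none_iff_contains d k).1 hg) (by simp [h])
    | some v => simp [PySem.Dict.getD, hg]
  · rw [if_neg h]
    by_contra hne
    exact h (by
      cases hg : d.get? k with
      | none => exact absurd hg hne
      | some v =>
        by_contra hc
        exact absurd ((PySem.Dict.get?_eq_none_iff_contains d k).2 (by simpa using hc)) (by simp [hg]))

theorem fl_build_inv (hay : List Char) : ∀ (s : Int) (d : PySem.Dict Char (List Int)) (c : Char),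
    ((PySem.List.enumerate hay s).foldl find_loose_step d).get? c =
      if d.contains c then some (d.getD c [] ++ fl_occ hay s c)
      else if fl_occ hay s c = [] then none else some (fl_occ hay s c) := by
  induction hay with
  | nil =>
    intro s d c
    simp only [PySem.List.enumerate_nil, List.foldl_nil, fl_occ, List.filterMap_nil,
      List.append_nil]
    rw [fl_get?_eq_if d c []]
    split_ifs <;> rfl
  | cons x xs ih =>
    intro s d c
    rw [PySem.List.enumerate_cons, List.foldl_cons, ih (s + 1) (find_loose_step d (s, x)) c,
      fl_occ_cons]
    by_cases hx : x = c
    · subst hx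
      have hcont : (find_loose_step d (s, x)).contains x = true := by
        unfold find_loose_step
        split_ifs with h
        · simp [PySem.Dict.contains_modify]
        · exact PySem.Dict.contains_insert_self d x [s]
      rw [if_pos hcont, if_pos rfl]
      by_cases h : d.contains x
      · have hgd : (find_loose_step d (s, x)).getD x [] = d.getD x [] ++ [s] := by
          unfold find_loose_step
          rw [if_pos h, PySem.Dict.getD_modify_self]
        rw [if_pos h, hgd]
        simp
      · have hgd : (find_loose_step d (s, x)).getD x [] = [s] := by
          unfold find_loose_step
          rw [if_neg h, PySem.Dict.getD_insert_self]
        rw [if_neg h, hgd]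
        simp
    · have hcont : (find_loose_step d (s, x)).contains c = d.contains c := by
        unfold find_loose_step
        split_ifs with h
        · rw [PySem.Dict.contains_modify]
          simp [Ne.symm hx]
        · rw [PySem.Dict.contains_insert]
          simp [Ne.symm hx]
      have hgd : (find_loose_step d (s, x)).getD c [] = d.getD c [] := by
        unfold find_loose_step
        split_ifs with h
        · exact PySem.Dict.getD_modify_of_ne d [] _ (Ne.symm hx)
        · exact PySem.Dict.getD_insert_of_ne d [(s, x).1] [] (Ne.symm hx)
      rw [hcont, hgd, if_neg hx]
      simp

theorem fl_sorted_le (lst : List Int) (hsort : lst.Pairwise (· < ·))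
    (i j : Nat) (hij : i ≤ j) (hj : j < lst.length) :
    lst.getD i 0 ≤ lst.getD j 0 := by
  rcases Nat.eq_or_lt_of_le hij with h | h
  · subst h; exact le_refl _
  · have := (List.pairwise_iff_getElem.1 hsort) i j (by omega) hj h
    rw [List.getD_eq_getElem lst 0 (by omega), List.getD_eq_getElem lst 0 hj]
    exact le_of_lt this

theorem fl_bisect_spec (lst : List Int) (pos : Int) (hsort : lst.Pairwise (· < ·)) :
    ∀ (k lo hi : Nat), hi - lo ≤ k → lo ≤ hi → hi ≤ lst.length →
      (∀ i, i < lo → lst.getD i 0 < pos) →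
      (∀ i, hi ≤ i → i < lst.length → ¬ lst.getD i 0 < pos) →
      lo ≤ find_loose_bisect lst pos k lo hi ∧ find_loose_bisect lst pos k lo hi ≤ hi ∧
      (∀ i, i < find_loose_bisect lst pos k lo hi → lst.getD i 0 < pos) ∧
      (∀ i, find_loose_bisect lst pos k lo hi ≤ i → i < lst.length → ¬ lst.getD i 0 < pos) := by
  intro k
  induction k with
  | zero =>
    intro lo hi hk hlh _ hbelow habove
    have hEq : lo = hi := by omega
    rw [find_loose_bisect]
    exact ⟨le_refl _, by omega, hbelow, by rw [hEq]; exact habove⟩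
  | succ k ih =>
    intro lo hi hk hlh hhi hbelow habove
    rw [find_loose_bisect]
    by_cases hlt : lo < hi
    · rw [if_pos hlt]
      set mid := (lo + hi) / 2 with hmid
      have hmlo : lo ≤ mid := by omega
      have hmhi : mid < hi := by omega
      by_cases hc : lst.getD mid 0 < pos
      · rw [if_pos hc]
        refine (ih (mid + 1) hi (by omega) (by omega) hhi ?_ habove).imp
          (fun h => by omega) id
        intro i hi'
        by_cases hio : i < lo
        · exact hbelow i hio
        · exact lt_of_le_of_lt (fl_sorted_le lst hsort i mid (by omega) (by omega)) hc
      · rw [if_neg hc]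
        refine (ih lo mid (by omega) (by omega) (by omega) hbelow ?_).imp
          id (fun h => ⟨by omega, h.2⟩)
        intro i hmi hil hcon
        exact hc (lt_of_le_of_lt (fl_sorted_le lst hsort mid i hmi hil) hcon)
    · rw [if_neg hlt]
      exact ⟨le_refl _, by omega, hbelow, fun i hi' => habove i (by omega)⟩

theorem fl_singleton_prefix_iff (c : Char) (l : List Char) :
    [c] <+: l ↔ l.head? = some c := by
  cases l with
  | nil => simp
  | cons x xs =>
    constructor
    · rintro ⟨t, ht⟩; simp_all
    · intro h; simp at h; exact ⟨xs, by simp [h]⟩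

theorem fl_singleton_prefix_drop (c : Char) (l : List Char) (i : Nat) :
    [c] <+: l.drop i ↔ l[i]? = some c := by
  rw [fl_singleton_prefix_iff, List.head?_drop]

-- what buildIndex returns for a char (specialization of the invariant)
theorem fl_build_get (hay : List Char) (c : Char) :
    (find_loose_buildIndex hay).get? c =
      if fl_occ hay 0 c = [] then none else some (fl_occ hay 0 c) := by
  unfold find_loose_buildIndex
  rw [fl_build_inv hay 0 PySem.Dict.empty c, if_neg (by simp [PySem.Dict.contains_empty])]

-- A's find step agrees with B's index-plus-binary-search step, and both loops agree
theorem fl_loop_eq (hay : List Char) :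
    ∀ (rest : List Char) (p : Nat), p ≤ hay.length →
      find_loose_aLoop hay rest (p : Int) (p : Int) =
        find_loose_bLoop (find_loose_buildIndex hay) rest (p : Int) := by
  intro rest
  induction rest with
  | nil => intro p hp; rfl
  | cons ch rest ih =>
    intro p hp
    rw [find_loose_aLoop, find_loose_bLoop, fl_build_get hay ch]
    set occ := fl_occ hay 0 ch with hocc
    by_cases hnil : occ = []
    · -- ch nowhere in hay: A's find returns -1, B's dict lookup misses
      rw [if_pos hnil]
      have hneg : PySem.Chars.findFrom hay [ch] (p : Int) none = -1 := by
        rw [PySem.Chars.findFrom_natCast_eq_neg_one_iff hay [ch] p hp]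
        intro hinf
        have hmem : ch ∈ hay.drop p := (List.singleton_sublist).1 hinf.sublist
        obtain ⟨j, hj⟩ := (List.mem_iff_getElem?).1 hmem
        rw [List.getElem?_drop] at hj
        have : ((p + j : Nat) : Int) ∈ occ := by
          rw [hocc, fl_occ_mem]
          exact ⟨p + j, (List.getElem?_eq_some_iff.1 hj).1, hj, by push_cast; ring⟩
        rw [hnil] at this; simp at this
      rw [hneg, if_pos (by norm_num : (-1 : Int) < 0)]
    · rw [if_neg hnil]
      show _ = (if find_loose_bisect occ (p : Int) occ.length 0 occ.length = occ.length then 0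
        else find_loose_bLoop (find_loose_buildIndex hay) rest
          (occ.getD (find_loose_bisect occ (p : Int) occ.length 0 occ.length) 0))
      have hsort : occ.Pairwise (· < ·) := fl_occ_sorted hay 0 ch
      obtain ⟨-, hr2, hbelow, habove⟩ := fl_bisect_spec occ (p : Int) hsort
        occ.length 0 occ.length (by omega) (by omega) (le_refl _)
        (by omega) (by omega)
      set r := find_loose_bisect occ (p : Int) occ.length 0 occ.length with hr
      by_cases hrl : r = occ.length
      · -- every occurrence is before p: A's find returns -1
        rw [if_pos hrl]
        have hneg : PySem.Chars.findFrom hay [ch] (p : Int) none = -1 := by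
          rw [PySem.Chars.findFrom_natCast_eq_neg_one_iff hay [ch] p hp]
          intro hinf
          have hmem : ch ∈ hay.drop p := (List.singleton_sublist).1 hinf.sublist
          obtain ⟨j, hj⟩ := (List.mem_iff_getElem?).1 hmem
          rw [List.getElem?_drop] at hj
          have hin : ((p + j : Nat) : Int) ∈ occ := by
            rw [hocc, fl_occ_mem]
            exact ⟨p + j, (List.getElem?_eq_some_iff.1 hj).1, hj, by push_cast; ring⟩
          obtain ⟨i, hi, hieq⟩ := (List.mem_iff_getElem).1 hin
          have := hbelow i (by omega)
          rw [List.getD_eq_getElem occ 0 hi, hieq] at this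
          omega
        rw [hneg, if_pos (by norm_num : (-1 : Int) < 0)]
      · rw [if_neg hrl]
        have hrlt : r < occ.length := by omega
        -- occ[r] is an occurrence of ch at index j ≥ p
        have hvin : occ.getD r 0 ∈ occ := by
          rw [List.getD_eq_getElem occ 0 hrlt]; exact List.getElem_mem hrlt
        obtain ⟨j, hj1, hj2, hj3⟩ := (fl_occ_mem hay 0 ch (occ.getD r 0)).1 (hocc ▸ hvin)
        have hj3' : occ.getD r 0 = (j : Int) := by omega
        have hpj : (p : Int) ≤ (j : Int) := by
          have := habove r (le_refl _) hrlt
          omega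
        -- A's find returns exactly j
        have hne : PySem.Chars.findFrom hay [ch] (p : Int) none ≠ -1 := by
          rw [Ne, PySem.Chars.findFrom_natCast_eq_neg_one_iff hay [ch] p hp]
          push Not
          have hpre : [ch] <+: hay.drop j := (fl_singleton_prefix_drop ch hay j).2 hj2
          have hdd : hay.drop j = (hay.drop p).drop (j - p) := by
            rw [List.drop_drop]; congr 1; omega
          rw [hdd] at hpre
          exact hpre.isInfix.trans (List.drop_suffix _ _).isInfix
        obtain ⟨hf1, hf2, hf3⟩ := PySem.Chars.findFrom_natCast_spec hay [ch] p hp hne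
        set f := PySem.Chars.findFrom hay [ch] (p : Int) none with hfdef
        have hfnn : 0 ≤ f := le_trans (Int.natCast_nonneg p) hf1
        have hfget : hay[f.toNat]? = some ch := (fl_singleton_prefix_drop ch hay _).1 hf2
        -- f ≤ j by minimality of f
        have hfj : f.toNat ≤ j := by
          by_contra hcon
          exact hf3 j (by omega) (by omega) ((fl_singleton_prefix_drop ch hay j).2 hj2)
        -- j ≤ f since f is an occurrence ≥ p, hence at index ≥ r in occ
        have hfin : ((f.toNat : Nat) : Int) ∈ occ := by
          rw [hocc, fl_occ_mem]
          refine ⟨f.toNat, ?_, hfget, by ring⟩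
          exact (List.getElem?_eq_some_iff.1 hfget).1
        obtain ⟨i, hi, hieq⟩ := (List.mem_iff_getElem).1 hfin
        have hir : r ≤ i := by
          by_contra hcon
          have := hbelow i (by omega)
          rw [List.getD_eq_getElem occ 0 hi, hieq] at this
          omega
        have hjf : (j : Int) ≤ (f.toNat : Int) := by
          have hle := fl_sorted_le occ hsort r i hir hi
          rw [List.getD_eq_getElem occ 0 hi, hieq] at hle
          omega
        have hfeq : f = (j : Int) := by omega
        rw [hfeq, if_neg (by omega : ¬ (j : Int) < 0), hj3']
        have harg : (p : Int) + ((j : Int) - (p : Int)) = (j : Int) := by ring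
        rw [harg]
        exact ih j (by omega)

-- ===== VERDICT (by name: the statement is the Claim_ definition above) =====
theorem find_loose_spec : Claim_equal_find_loose := by
  intro haystack needle _ _
  unfold Spec_find_loose find_loose find_loose_alt
  have h := fl_loop_eq haystack.toList needle.toList 0 (Nat.zero_le _)
  simpa using h
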